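-- pv_equiv track=rewrite | github.com/NataliiaRom/Hillel_QAautoPython_learning | lesson7/compare_dicts.py | compare_grades
-- ===== SOURCE A (Python) =====
-- def compare_grades(grades1, grades2):
--     # YOUR CODE HERE
--     comparison_dict = {}
--
--     score_difference1_based_on_dict1 = []
--     for k in grades1.keys():
--         ####to uncomment the 'if' line, if we don't want unique users to be in a final list
--         # if k in grades2.keys():
--             diff = grades1.get(k) - grades2.get(k, 0)
--             score_difference1_based_on_dict1.append(diff)
--     comparison_dict.update(dict(zip(grades1.keys(), score_difference1_based_on_dict1)))
--
-- ###to comment the below section until 'return', if we don't want unique users to be in a final list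
--     score_difference_based_on_dict2 = []
--     list_of_unique_keys_of_dict2 = []
--     for l in grades2.keys():
--         if l not in grades1.keys():
--             diff = grades1.get(l,0) - grades2.get(l)
--             score_difference_based_on_dict2.append(diff)
--             list_of_unique_keys_of_dict2.append(l)
--
--     comparison_dict.update(dict(zip(list_of_unique_keys_of_dict2, score_difference_based_on_dict2)))
--
--
--     return comparison_dict
-- ===== SOURCE B (Python) =====
-- def compare_grades(grades1, grades2):
--     # destructive-accumulator strategy: start from a copy of grades1 and
--     # subtract grades2's scores into it in place; shared keys are updated
--     # in position, grades2-only keys get appended as 0 - score.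
--     result = dict(grades1)
--     for k, v in grades2.items():
--         result[k] = result.get(k, 0) - v
--     return result
-- ===== Notes on version B (the rewrite author's own statement) =====
-- stated objective: simpler
-- what changed: A builds the answer by two filtered passes over the key union with parallel diff/key lists, zips and dict updates, looking both dicts up for every key; B never forms the union: it copies grades1 and runs one destructive pass over grades2, subtracting each score into the accumulator in place.
import Mathlib
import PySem

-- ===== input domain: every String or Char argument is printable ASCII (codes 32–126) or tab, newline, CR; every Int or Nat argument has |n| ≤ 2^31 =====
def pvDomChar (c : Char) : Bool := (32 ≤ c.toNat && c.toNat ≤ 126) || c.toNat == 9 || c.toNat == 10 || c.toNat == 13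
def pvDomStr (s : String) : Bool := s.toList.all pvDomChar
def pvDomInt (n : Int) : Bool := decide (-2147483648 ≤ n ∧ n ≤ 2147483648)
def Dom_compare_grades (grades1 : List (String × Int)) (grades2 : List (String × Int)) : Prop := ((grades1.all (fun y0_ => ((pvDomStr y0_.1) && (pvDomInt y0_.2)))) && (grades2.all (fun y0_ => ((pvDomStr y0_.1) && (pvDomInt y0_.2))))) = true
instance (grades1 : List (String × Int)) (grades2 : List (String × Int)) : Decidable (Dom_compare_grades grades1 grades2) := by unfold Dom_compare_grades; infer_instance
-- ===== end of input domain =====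

-- B replaces A's two filtered passes over the key union (parallel diff/key lists, zips, dict
-- updates) by a destructive accumulator: copy grades1, then one pass over grades2 subtracting
-- each score into the copy in place (objective: simpler).

-- ===== PORT A =====
def compare_grades (grades1 : List (String × Int)) (grades2 : List (String × Int)) : List (String × Int) :=
  let d1 := PySem.Dict.ofList grades1
  let d2 := PySem.Dict.ofList grades2
  let comparison0 : PySem.Dict String Int := PySem.Dict.empty
  -- first loop: grades1.get(k) with k drawn from grades1.keys() always hits, so (get? k).getD 0 is exact
  let diffs1 := d1.keys.foldl (fun acc k => acc ++ [(d1.get? k).getD 0 - d2.getD k 0]) []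
  let comparison1 := comparison0.update (d1.keys.zip diffs1)
  -- second loop: parallel diff / unique-key lists, as in A
  let st := d2.keys.foldl
      (fun (st : List Int × List String) l =>
        if !(d1.contains l) then (st.1 ++ [d1.getD l 0 - (d2.get? l).getD 0], st.2 ++ [l]) else st)
      ([], [])
  let comparison2 := comparison1.update (st.2.zip st.1)
  comparison2.items

-- ===== PORT B =====
def compare_grades_alt (grades1 : List (String × Int)) (grades2 : List (String × Int)) : List (String × Int) :=
  let result := PySem.Dict.ofList grades1          -- result = dict(grades1)
  ((PySem.Dict.ofList grades2).items.foldl          -- for k, v in grades2.items():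
      (fun r p => r.insert p.1 (r.getD p.1 0 - p.2))   --   result[k] = result.get(k, 0) - v
      result).items

-- ===== PRECONDITION & SPEC =====
def Spec_compare_grades (grades1 : List (String × Int)) (grades2 : List (String × Int)) (out : List (String × Int)) : Prop := out = compare_grades_alt grades1 grades2
instance (grades1 : List (String × Int)) (grades2 : List (String × Int)) (out : List (String × Int)) : Decidable (Spec_compare_grades grades1 grades2 out) := by unfold Spec_compare_grades; infer_instance

-- ===== CLAIM (what is proved, stated in full; the proofs are below) =====
def Claim_equal_compare_grades : Prop := ∀ (grades1 : List (String × Int)) (grades2 : List (String × Int)), Dom_compare_grades grades1 grades2 → Spec_compare_grades grades1 grades2 (compare_grades grades1 grades2)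

-- ===== LEMMAS AND PROOFS =====

theorem foldl_append_map {α β : Type} (g : α → β) :
    ∀ (l : List α) (acc : List β), l.foldl (fun a k => a ++ [g k]) acc = acc ++ l.map g := by
  intro l
  induction l with
  | nil => simp
  | cons x xs ih => intro acc; simp [List.foldl, ih]

theorem foldl_filter_pair {α β : Type} (p : α → Bool) (f : α → β) :
    ∀ (l : List α) (a : List β) (b : List α),
      l.foldl (fun st x => if p x then (st.1 ++ [f x], st.2 ++ [x]) else st) (a, b)
        = (a ++ (l.filter p).map f, b ++ l.filter p) := by
  intro l
  induction l with
  | nil => simp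
  | cons x xs ih =>
    intro a b
    by_cases h : p x = true
    · simp [List.foldl, h, ih]
    · simp only [Bool.not_eq_true] at h
      simp [List.foldl, h, ih]

theorem zip_self_map {α β : Type} (g : α → β) :
    ∀ (l : List α), l.zip (l.map g) = l.map (fun k => (k, g k)) := by
  intro l
  induction l with
  | nil => rfl
  | cons x xs ih => simp [ih]

theorem items_update_fresh (d : PySem.Dict String Int) (ks : List String) (g : String → Int)
    (hfresh : ∀ k ∈ ks, d.contains k = false) (hnd : ks.Nodup) :
    (d.update (ks.map (fun k => (k, g k)))).items = d.items ++ ks.map (fun k => (k, g k)) := by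
  show ((ks.map (fun k => (k, g k))).foldl (fun acc p => acc.insert p.1 p.2) d).items = _
  rw [PySem.Dict.items_foldl_insert_fresh (k := Prod.fst) (v := Prod.snd)]
  · simp
  · intro a ha
    simp only [List.mem_map] at ha
    obtain ⟨k, hk, rfl⟩ := ha
    exact hfresh k hk
  · simp only [List.map_map]
    have h : List.map (Prod.fst ∘ fun k => (k, g k)) ks = ks := by
      simp [Function.comp_def]
    rw [h]; exact hnd

-- A returns the diffs over grades1's keys followed by grades2-only keys, all valued getD-0 minus getD-0.
theorem A_char (g1 g2 : List (String × Int)) :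
    compare_grades g1 g2
      = (PySem.Dict.ofList g1).keys.map
          (fun k => (k, (PySem.Dict.ofList g1).getD k 0 - (PySem.Dict.ofList g2).getD k 0))
        ++ ((PySem.Dict.ofList g2).keys.filter (fun k => !((PySem.Dict.ofList g1).contains k))).map
          (fun k => (k, (PySem.Dict.ofList g1).getD k 0 - (PySem.Dict.ofList g2).getD k 0)) := by
  unfold compare_grades
  simp only []
  set d1 := PySem.Dict.ofList g1 with hd1
  set d2 := PySem.Dict.ofList g2 with hd2
  have hnd1 : d1.keys.Nodup := PySem.Dict.nodup_keys_ofList g1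
  have hnd2 : d2.keys.Nodup := PySem.Dict.nodup_keys_ofList g2
  have hcontains : ∀ k, d1.contains k = decide (k ∈ d1.keys) := fun k =>
    PySem.Dict.contains_eq_decide_mem_keys d1 k
  set filtered := d2.keys.filter (fun k => !(d1.contains k)) with hfil
  have hndf : filtered.Nodup := hnd2.filter _
  have hfresh1 : ∀ k ∈ d1.keys, (PySem.Dict.empty : PySem.Dict String Int).contains k = false := by
    intro k _; exact PySem.Dict.contains_empty k
  rw [foldl_append_map]
  simp only [List.nil_append]
  rw [zip_self_map, foldl_filter_pair]
  simp only [List.nil_append]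
  rw [zip_self_map]
  have hitems1 : (PySem.Dict.empty.update
      (d1.keys.map (fun k => (k, (d1.get? k).getD 0 - d2.getD k 0)))).items
      = d1.keys.map (fun k => (k, (d1.get? k).getD 0 - d2.getD k 0)) := by
    simpa using items_update_fresh PySem.Dict.empty d1.keys
      (fun k => (d1.get? k).getD 0 - d2.getD k 0) hfresh1 hnd1
  have hkeys1 : (PySem.Dict.empty.update
      (d1.keys.map (fun k => (k, (d1.get? k).getD 0 - d2.getD k 0)))).keys = d1.keys := by
    show (PySem.Dict.empty.update _).items.map Prod.fst = _
    rw [hitems1]; simp [Function.comp_def]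
  have hfresh2 : ∀ k ∈ filtered, (PySem.Dict.empty.update
      (d1.keys.map (fun k => (k, (d1.get? k).getD 0 - d2.getD k 0)))).contains k = false := by
    intro k hk
    rw [PySem.Dict.contains_eq_decide_mem_keys, hkeys1]
    simp only [hfil, List.mem_filter] at hk
    have := hk.2
    rw [hcontains k] at this
    simpa using this
  have hitems2 : ((PySem.Dict.empty.update
        (d1.keys.map (fun k => (k, (d1.get? k).getD 0 - d2.getD k 0)))).update
        (filtered.map (fun k => (k, d1.getD k 0 - (d2.get? k).getD 0)))).items
      = d1.keys.map (fun k => (k, (d1.get? k).getD 0 - d2.getD k 0))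
        ++ filtered.map (fun k => (k, d1.getD k 0 - (d2.get? k).getD 0)) := by
    have := items_update_fresh _ filtered
      (fun k => d1.getD k 0 - (d2.get? k).getD 0) hfresh2 hndf
    have hempty : (PySem.Dict.empty : PySem.Dict String Int).items = [] := rfl
    simpa [hitems1, hempty] using this
  rw [hitems2]
  simp [PySem.Dict.getD_eq_get?_getD]

-- The in-place subtraction loop, characterised for any pair list with distinct keys:
-- existing entries are updated in position, fresh keys append as 0 - v.
theorem foldl_sub_items :
    ∀ (ps : List (String × Int)) (d : PySem.Dict String Int),
      (ps.map Prod.fst).Nodup → d.keys.Nodup →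
      (ps.foldl (fun r p => r.insert p.1 (r.getD p.1 0 - p.2)) d).items
        = d.items.map (fun q => (q.1, q.2 - ((ps.find? (fun p => p.1 == q.1)).map Prod.snd).getD 0))
          ++ (ps.filter (fun p => !(d.contains p.1))).map (fun p => (p.1, 0 - p.2)) := by
  intro ps
  induction ps with
  | nil => intro d _ _; simp
  | cons p ps ih =>
    intro d hps hd
    have hp_notin : p.1 ∉ ps.map Prod.fst := (List.nodup_cons.mp hps).1
    have hps' : (ps.map Prod.fst).Nodup := (List.nodup_cons.mp hps).2
    have hfind_none : ps.find? (fun x => x.1 == p.1) = none := by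
      rw [List.find?_eq_none]
      intro x hx
      simp only [beq_iff_eq]
      intro hxe
      exact hp_notin (hxe ▸ List.mem_map_of_mem hx)
    have hd' : (d.insert p.1 (d.getD p.1 0 - p.2)).keys.Nodup :=
      PySem.Dict.nodup_keys_insert d _ _ hd
    simp only [List.foldl_cons]
    rw [ih _ hps' hd']
    by_cases hc : d.contains p.1 = true
    · -- p.1 already present: the entry is rewritten in place, nothing appended
      rw [PySem.Dict.items_insert_of_contains d _ hc]
      rw [List.map_map]
      have hmap : d.items.map
            ((fun q => (q.1, q.2 - ((ps.find? (fun x => x.1 == q.1)).map Prod.snd).getD 0)) ∘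
              (fun q => if q.1 == p.1 then (p.1, d.getD p.1 0 - p.2) else q))
          = d.items.map (fun q => (q.1, q.2 - (((p :: ps).find? (fun x => x.1 == q.1)).map Prod.snd).getD 0)) := by
        apply List.map_congr_left
        intro q hq
        by_cases hqp : q.1 = p.1
        · have hval : d.getD p.1 0 = q.2 := by
            have : (p.1, q.2) ∈ d.items := by
              have : q = (p.1, q.2) := by
                cases q; simp_all
              exact this ▸ hq
            exact PySem.Dict.getD_of_mem_items d this hd 0
          simp [hqp, hfind_none, hval]
        · have hne : (p.1 == q.1) = false := by simp [Ne.symm hqp]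
          simp [hqp, hne]
      rw [hmap]
      have hfilt : ps.filter (fun x => !((d.insert p.1 (d.getD p.1 0 - p.2)).contains x.1))
          = ps.filter (fun x => !(d.contains x.1)) := by
        apply List.filter_congr
        intro x hx
        have hxp : (x.1 == p.1) = false := by
          simp only [beq_eq_false_iff_ne, ne_eq]
          intro hxe
          exact hp_notin (hxe ▸ List.mem_map_of_mem hx)
        rw [PySem.Dict.contains_insert d _ _ _, hxp]
        simp
      rw [hfilt]
      have : (p :: ps).filter (fun x => !(d.contains x.1)) = ps.filter (fun x => !(d.contains x.1)) := by
        simp [hc]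
      rw [this]
    · -- p.1 fresh: getD defaults to 0 and the entry is appended
      have hc' : d.contains p.1 = false := by simpa using hc
      have hgd : d.getD p.1 0 = 0 := PySem.Dict.getD_of_not_contains d 0 hc'
      rw [PySem.Dict.items_insert_of_not_contains d _ hc', hgd]
      rw [List.map_append]
      have hmap : d.items.map (fun q => (q.1, q.2 - ((ps.find? (fun x => x.1 == q.1)).map Prod.snd).getD 0))
          = d.items.map (fun q => (q.1, q.2 - (((p :: ps).find? (fun x => x.1 == q.1)).map Prod.snd).getD 0)) := by
        apply List.map_congr_left
        intro q hq
        have hqp : (p.1 == q.1) = false := by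
          simp only [beq_eq_false_iff_ne, ne_eq]
          intro hpe
          have : d.contains q.1 = true := by
            rw [PySem.Dict.contains_eq_decide_mem_keys]
            simpa using PySem.Dict.mem_keys_of_mem_items d hq
          rw [← hpe] at this
          exact absurd this (by simp [hc'])
        simp [hqp]
      rw [hmap]
      have hfilt : ps.filter (fun x => !((d.insert p.1 (0 - p.2)).contains x.1))
          = ps.filter (fun x => !(d.contains x.1)) := by
        apply List.filter_congr
        intro x hx
        have hxp : (x.1 == p.1) = false := by
          simp only [beq_eq_false_iff_ne, ne_eq]
          intro hxe
          exact hp_notin (hxe ▸ List.mem_map_of_mem hx)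
        rw [PySem.Dict.contains_insert d _ _ _, hxp]
        simp
      rw [hfilt]
      have : (p :: ps).filter (fun x => !(d.contains x.1))
          = p :: ps.filter (fun x => !(d.contains x.1)) := by
        simp [hc']
      rw [this]
      simp [List.find?_cons, hfind_none, List.append_assoc]

-- B reaches the same normal form as A.
theorem B_char (g1 g2 : List (String × Int)) :
    compare_grades_alt g1 g2
      = (PySem.Dict.ofList g1).keys.map
          (fun k => (k, (PySem.Dict.ofList g1).getD k 0 - (PySem.Dict.ofList g2).getD k 0))
        ++ ((PySem.Dict.ofList g2).keys.filter (fun k => !((PySem.Dict.ofList g1).contains k))).map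
          (fun k => (k, (PySem.Dict.ofList g1).getD k 0 - (PySem.Dict.ofList g2).getD k 0)) := by
  unfold compare_grades_alt
  simp only []
  set d1 := PySem.Dict.ofList g1 with hd1
  set d2 := PySem.Dict.ofList g2 with hd2
  have hnd1 : d1.keys.Nodup := PySem.Dict.nodup_keys_ofList g1
  have hnd2 : d2.keys.Nodup := PySem.Dict.nodup_keys_ofList g2
  have hkeys2 : (d2.items.map Prod.fst).Nodup := hnd2
  rw [foldl_sub_items d2.items d1 hkeys2 hnd1]
  congr 1
  · -- updated grades1 entries
    rw [PySem.Dict.items_eq_map_keys d1 hnd1 0, List.map_map]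
    apply List.map_congr_left
    intro k _
    have : (d2.items.find? (fun p => p.1 == k)).map Prod.snd = d2.get? k := rfl
    simp [this, PySem.Dict.getD_eq_get?_getD]
  · -- appended grades2-only entries
    rw [PySem.Dict.items_eq_map_keys d2 hnd2 0, List.filter_map, List.map_map]
    apply List.map_congr_left
    intro k hk
    simp only [List.mem_filter, Function.comp_def] at hk
    have hc : d1.contains k = false := by simpa using hk.2
    simp [PySem.Dict.getD_of_not_contains d1 0 hc]

-- ===== VERDICT (by name: the statement is the Claim_ definition above) =====
theorem compare_grades_spec : Claim_equal_compare_grades := by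
  intro g1 g2 _
  show compare_grades g1 g2 = compare_grades_alt g1 g2
  rw [A_char, B_char]
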